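-- pv_equiv track=rewrite | github.com/fujiehuang/Introduction-to-Algorithms-4th-Edition | implementation_generated_by_AI/Chapter_14_Dynamic_Programming/Exercises-14.1/14.1-3/14.1-3.py | cut_rod_with_cost
-- ===== SOURCE A (Python) =====
-- from typing import List, Tuple
--
-- def cut_rod_with_cost(p: List[int], n: int, c: int) -> Tuple[int, List[int]]:
--     r = [0] * (n + 1)
--     s = [0] * (n + 1)
--     for j in range(1, n + 1):
--         q = float('-inf')
--         for i in range(1, j):
--             if q < p[i] + r[j - i] - c:
--                 q = p[i] + r[j - i] - c
--                 s[j] = i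
--         if q < p[j]:
--             q = p[j]
--             s[j] = j
--         r[j] = q
--
--     cut_off_pieces = []
--     while n > 0:
--         cut_off_pieces.append(s[n])
--         n -= s[n]
--     return r[-1], cut_off_pieces
-- ===== SOURCE B (Python) =====
-- def cut_rod_with_cost(p, n, c):
--     # Forward pass stores only revenues; the cut choices are recovered during
--     # reconstruction by scanning for the first candidate that attains r[m].
--     r = [0]
--     for j in range(1, n + 1):
--         r.append(max([x + y - c for x, y in zip(p[1:j], reversed(r[1:j]))] + [p[j]]))
--     pieces = []
--     m = n
--     while m > 0:
--         piece = m
--         for i in range(1, m):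
--             if p[i] + r[m - i] - c == r[m]:
--                 piece = i
--                 break
--         pieces.append(piece)
--         m -= piece
--     return r[n], pieces
-- ===== Notes on version B (the rewrite author's own statement) =====
-- stated objective: alternative
-- what changed: B drops the s[] choice array entirely: the forward pass stores only the revenue table (each r[j] as max over an explicit candidate list), and the cut sequence is recovered afterwards by scanning, at each remaining length m, for the first candidate value that attains r[m].
import Mathlib
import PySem

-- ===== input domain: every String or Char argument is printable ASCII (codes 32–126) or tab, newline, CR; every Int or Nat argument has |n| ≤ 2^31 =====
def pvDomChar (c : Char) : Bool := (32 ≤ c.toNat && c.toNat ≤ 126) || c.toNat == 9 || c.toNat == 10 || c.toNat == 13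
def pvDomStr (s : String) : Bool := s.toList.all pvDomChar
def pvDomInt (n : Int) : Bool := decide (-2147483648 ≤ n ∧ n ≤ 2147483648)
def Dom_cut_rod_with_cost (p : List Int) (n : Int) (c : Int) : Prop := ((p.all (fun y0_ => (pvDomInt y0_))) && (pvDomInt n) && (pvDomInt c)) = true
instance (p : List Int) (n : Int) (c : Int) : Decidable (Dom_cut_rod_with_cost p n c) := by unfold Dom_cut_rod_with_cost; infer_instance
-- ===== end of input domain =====

-- B removes A's s[] choice array: the forward DP keeps only revenues and the cut
-- sequence is reconstructed by re-finding, for each remaining length, the first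
-- candidate that attains the stored optimum (objective: alternative, same cost).

-- shared arithmetic expression p[i] + r[j-i] - c appearing in both Pythons
def pvCand (p : List Int) (c : Int) (r : List Int) (m i : Nat) : Int :=
  p.getD i 0 + r.getD (m - i) 0 - c

-- ===== PORT A =====
-- q starts as float('-inf'); modelled as Option Int with none = -inf
def pvLtQ : Option Int → Int → Bool
  | none, _ => true
  | some x, v => decide (x < v)

-- one iteration of A's outer loop: inner scan tracking (q, s[j]), the p[j] check, then r[j] := q, s[j] := tag
def pvStepA (p : List Int) (c : Int) (st : List Int × List Int) (j : Nat) : List Int × List Int :=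
  let inner := (List.range' 1 (j-1)).foldl
    (fun q i => if pvLtQ q.1 (pvCand p c st.1 j i) then (some (pvCand p c st.1 j i), (i : Int)) else q)
    ((none : Option Int), st.2.getD j 0)
  let fin := if pvLtQ inner.1 (p.getD j 0) then ((some (p.getD j 0) : Option Int), (j : Int)) else inner
  (st.1.set j (fin.1.getD 0), st.2.set j fin.2)

-- A's reconstruction while-loop (fuel = at most n iterations since every recorded piece is ≥ 1)
def pvRebuildA (s : List Int) : Nat → Int → List Int
  | 0, _ => []
  | fuel+1, m => if 0 < m then s.getD m.toNat 0 :: pvRebuildA s fuel (m - s.getD m.toNat 0) else []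

def cut_rod_with_cost (p : List Int) (n : Int) (c : Int) : Int × List Int :=
  let N := n.toNat
  let rs := (List.range' 1 N).foldl (pvStepA p c) (List.replicate (N+1) 0, List.replicate (N+1) 0)
  (rs.1.getD (rs.1.length - 1) 0, pvRebuildA rs.2 (N+1) n)

-- ===== PORT B =====
-- one iteration of B's loop: append max of the explicit candidate list
def pvStepB (p : List Int) (c : Int) (r : List Int) (j : Nat) : List Int :=
  r ++ [(PySem.List.max?
          (((PySem.List.slice p (some (1 : Int)) (some (j : Int))).zip
              (PySem.List.slice r (some (1 : Int)) (some (j : Int))).reverse).map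
            (fun xy => xy.1 + xy.2 - c) ++ [p.getD j 0]) (fun y => y)).getD 0]

-- B's inner for/break: first i in 1..m-1 whose candidate attains r[m], default m
def pvPieceB (p : List Int) (c : Int) (r : List Int) (m : Nat) : Int :=
  match (List.range' 1 (m-1)).find? (fun i => pvCand p c r m i == r.getD m 0) with
  | some i => (i : Int)
  | none => (m : Int)

def pvRebuildB (p : List Int) (c : Int) (r : List Int) : Nat → Int → List Int
  | 0, _ => []
  | fuel+1, m => if 0 < m then pvPieceB p c r m.toNat :: pvRebuildB p c r fuel (m - pvPieceB p c r m.toNat) else []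

def cut_rod_with_cost_alt (p : List Int) (n : Int) (c : Int) : Int × List Int :=
  let N := n.toNat
  let r := (List.range' 1 N).foldl (pvStepB p c) [0]
  (r.getD N 0, pvRebuildB p c r (N+1) n)

-- ===== PRECONDITION & SPEC =====
-- Pre_ excludes exactly the inputs where Python A raises IndexError: n < 0 (r[-1] on an
-- empty list) or 0 < n ≥ len(p) (p[j] out of range).
def Pre_cut_rod_with_cost (p : List Int) (n : Int) (c : Int) : Prop :=
  0 ≤ n ∧ (n = 0 ∨ n < (p.length : Int))
instance (p : List Int) (n : Int) (c : Int) : Decidable (Pre_cut_rod_with_cost p n c) := by unfold Pre_cut_rod_with_cost; infer_instance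

def pvWitness_cut_rod_with_cost : List Int × Int × Int := ([0, 1, 5, 8], 3, 1)

def Spec_cut_rod_with_cost (p : List Int) (n : Int) (c : Int) (out : Int × List Int) : Prop := out = cut_rod_with_cost_alt p n c
instance (p : List Int) (n : Int) (c : Int) (out : Int × List Int) : Decidable (Spec_cut_rod_with_cost p n c out) := by unfold Spec_cut_rod_with_cost; infer_instance

-- ===== CLAIM (what is proved, stated in full; the proofs are below) =====
def Claim_equal_cut_rod_with_cost : Prop := ∀ (p : List Int) (n : Int) (c : Int), Dom_cut_rod_with_cost p n c → Pre_cut_rod_with_cost p n c → Spec_cut_rod_with_cost p n c (cut_rod_with_cost p n c)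


-- ===== LEMMAS AND PROOFS =====

-- proof-side views of the two folds
def pvScan (v : Nat → Int) (l : List Nat) (st : Option Int × Int) : Option Int × Int :=
  l.foldl (fun q i => if pvLtQ q.1 (v i) then (some (v i), (i : Int)) else q) st

def pvTag (v : Nat → Int) (l : List Nat) (Q d : Int) : Int :=
  match l.find? (fun i => v i == Q) with
  | some i => (i : Int)
  | none => d

def pvStA (p : List Int) (c : Int) (N j : Nat) : List Int × List Int :=
  (List.range' 1 j).foldl (pvStepA p c) (List.replicate (N+1) 0, List.replicate (N+1) 0)

def pvStB (p : List Int) (c : Int) (j : Nat) : List Int :=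
  (List.range' 1 j).foldl (pvStepB p c) [0]

lemma getD_set_self (l : List Int) (j : Nat) (x : Int) (h : j < l.length) :
    (l.set j x).getD j 0 = x := by
  simp [List.getD_eq_getElem?_getD, h]

lemma getD_set_ne (l : List Int) (j k : Nat) (x : Int) (h : j ≠ k) :
    (l.set j x).getD k 0 = l.getD k 0 := by
  simp [List.getD_eq_getElem?_getD, h]

lemma getD_append_left (l l2 : List Int) (k : Nat) (h : k < l.length) :
    (l ++ l2).getD k 0 = l.getD k 0 := by
  simp [List.getD_eq_getElem?_getD, List.getElem?_append_left h]

lemma getD_append_self (l : List Int) (x : Int) :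
    (l ++ [x]).getD l.length 0 = x := by
  simp [List.getD_eq_getElem?_getD]

lemma find?_congr_mem {α : Type} (l : List α) (f g : α → Bool)
    (h : ∀ a ∈ l, f a = g a) : l.find? f = l.find? g := by
  induction l with
  | nil => rfl
  | cons a t ih =>
    simp only [List.find?_cons]
    rw [h a (List.mem_cons_self)]
    cases g a
    · exact ih (fun x hx => h x (List.mem_cons_of_mem _ hx))
    · rfl

lemma pvTag_cons (v : Nat → Int) (a : Nat) (l : List Nat) (Q d : Int) :
    pvTag v (a :: l) Q d = if v a = Q then (a : Int) else pvTag v l Q d := by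
  by_cases h : v a = Q <;> simp [pvTag, h]

lemma pvTag_default_eq (v : Nat → Int) (l : List Nat) (Q d d' : Int)
    (h : ∃ i ∈ l, v i = Q) : pvTag v l Q d = pvTag v l Q d' := by
  obtain ⟨i, hi, hvi⟩ := h
  have hs : (l.find? (fun i => v i == Q)).isSome := by
    rw [List.find?_isSome]; exact ⟨i, hi, by simp [hvi]⟩
  cases hf : l.find? (fun i => v i == Q) with
  | none => rw [hf] at hs; simp at hs
  | some j => simp [pvTag, hf]

lemma pvScan_some (v : Nat → Int) (l : List Nat) (q t : Int) :
    pvScan v l (some q, t)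
      = (some ((l.map v).foldl max q),
         if q < (l.map v).foldl max q then pvTag v l ((l.map v).foldl max q) t else t) := by
  induction l generalizing q t with
  | nil => simp [pvScan, pvTag]
  | cons a l ih =>
    by_cases hqa : q < v a
    · have h1 : pvScan v (a :: l) (some q, t) = pvScan v l (some (v a), (a : Int)) := by
        simp [pvScan, pvLtQ, hqa]
      have hQ : ((a :: l).map v).foldl max q = (l.map v).foldl max (v a) := by
        simp [max_eq_right (le_of_lt hqa)]
      set Q' := (l.map v).foldl max (v a) with hQ'
      have hle : v a ≤ Q' := (PySem.List.le_foldl_max (l.map v) (v a)).1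
      have hqQ : q < Q' := lt_of_lt_of_le hqa hle
      rw [h1, ih, hQ, if_pos hqQ, pvTag_cons]
      by_cases hva : v a = Q'
      · rw [if_pos hva, if_neg (by omega)]
      · have hlt : v a < Q' := lt_of_le_of_ne hle hva
        rw [if_neg hva, if_pos hlt]
        have hmem : Q' ∈ l.map v := by
          rcases PySem.List.foldl_max_mem (l.map v) (v a) with h | h
          · exact absurd h.symm hva
          · exact h
        obtain ⟨i, hi, hvi⟩ := List.mem_map.mp hmem
        rw [pvTag_default_eq v l Q' (a : Int) t ⟨i, hi, hvi⟩]
    · have hva : v a ≤ q := le_of_not_gt hqa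
      have h1 : pvScan v (a :: l) (some q, t) = pvScan v l (some q, t) := by
        simp [pvScan, pvLtQ, hqa]
      have hQ : ((a :: l).map v).foldl max q = (l.map v).foldl max q := by
        simp [max_eq_left hva]
      set Q := (l.map v).foldl max q with hQdef
      rw [h1, ih, hQ]
      by_cases hq : q < Q
      · rw [if_pos hq, if_pos hq, pvTag_cons, if_neg (by omega)]
      · rw [if_neg hq, if_neg hq]

lemma pvStep_pair (v : Nat → Int) (l : List Nat) (pj t d : Int) :
    (let st := pvScan v l ((none : Option Int), t);
     if pvLtQ st.1 pj then ((some pj : Option Int), d) else st)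
      = (PySem.List.max? (l.map v ++ [pj]) (fun y => y),
         pvTag v l ((PySem.List.max? (l.map v ++ [pj]) (fun y => y)).getD 0) d) := by
  cases l with
  | nil =>
    simp [pvScan, pvLtQ, pvTag, PySem.List.max?_id_cons]
  | cons a l =>
    have h1 : pvScan v (a :: l) ((none : Option Int), t) = pvScan v l (some (v a), (a : Int)) := by
      simp [pvScan, pvLtQ]
    set Q' := (l.map v).foldl max (v a) with hQ'
    have hle : v a ≤ Q' := (PySem.List.le_foldl_max (l.map v) (v a)).1
    have hlemem : ∀ y ∈ l.map v, y ≤ Q' := (PySem.List.le_foldl_max (l.map v) (v a)).2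
    have hmax : PySem.List.max? ((a :: l).map v ++ [pj]) (fun y => y) = some (max Q' pj) := by
      have : (a :: l).map v ++ [pj] = v a :: (l.map v ++ [pj]) := by simp
      rw [this, PySem.List.max?_id_cons, List.foldl_append]
      simp [hQ']
    rw [hmax]
    simp only [h1, pvScan_some]
    by_cases hq : Q' < pj
    · rw [if_pos (by simp only [pvLtQ, decide_eq_true_eq]; exact hq)]
      have hm : max Q' pj = pj := max_eq_right (le_of_lt hq)
      have hfn : List.find? (fun i => v i == pj) (a :: l) = none := by
        rw [List.find?_eq_none]
        intro x hx
        rcases List.mem_cons.mp hx with h | h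
        · subst h; simp; omega
        · have := hlemem (v x) (List.mem_map_of_mem h)
          simp; omega
      simp only [Option.getD_some, hm]
      simp [pvTag, hfn]
    · rw [if_neg (by simp only [pvLtQ, decide_eq_true_eq]; omega)]
      have hm : max Q' pj = Q' := max_eq_left (by omega)
      simp only [Option.getD_some, hm, Prod.mk.injEq]
      refine ⟨rfl, ?_⟩
      rw [pvTag_cons]
      by_cases hva : v a = Q'
      · rw [if_pos hva, if_neg (by omega)]
      · have hlt : v a < Q' := lt_of_le_of_ne hle hva
        rw [if_neg hva, if_pos hlt]
        have hmem : Q' ∈ l.map v := by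
          rcases PySem.List.foldl_max_mem (l.map v) (v a) with h | h
          · exact absurd h.symm hva
          · exact h
        obtain ⟨i, hi, hvi⟩ := List.mem_map.mp hmem
        exact pvTag_default_eq v l Q' (a : Int) d ⟨i, hi, hvi⟩

lemma pvCand_append (p : List Int) (c : Int) (r : List Int) (x : Int) (m i : Nat)
    (h : m - i < r.length) : pvCand p c (r ++ [x]) m i = pvCand p c r m i := by
  simp only [pvCand]
  rw [getD_append_left _ _ _ h]

lemma pvPieceB_append (p : List Int) (c : Int) (r : List Int) (x : Int) (m : Nat)
    (h : m < r.length) : pvPieceB p c (r ++ [x]) m = pvPieceB p c r m := by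
  unfold pvPieceB
  rw [getD_append_left _ _ _ h,
      find?_congr_mem _ _ _ (fun i _ => by rw [pvCand_append p c r x m i (by omega)])]

-- B's zipped-slices candidate list is the index-mapped candidate list
lemma pvCands_eq (p : List Int) (c : Int) (r : List Int) (j : Nat)
    (hr : r.length = j) (hp : j ≤ p.length) :
    ((PySem.List.slice p (some (1 : Int)) (some (j : Int))).zip
        (PySem.List.slice r (some (1 : Int)) (some (j : Int))).reverse).map
      (fun xy => xy.1 + xy.2 - c)
      = (List.range' 1 (j-1)).map (pvCand p c r j) := by
  rw [PySem.List.slice_toNat p (by omega) (by omega),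
      PySem.List.slice_toNat r (by omega) (by omega)]
  simp only [Int.toNat_one, Int.toNat_natCast]
  have hrd : (r.drop 1).take (j - 1) = r.drop 1 := by
    apply List.take_of_length_le
    simp [hr]
  rw [hrd]
  apply List.ext_getElem
  · simp [hr]; omega
  · intro k hk1 hk2
    simp only [List.getElem_map, List.getElem_zip, List.getElem_take, List.getElem_drop,
      List.getElem_reverse, List.getElem_range']
    simp only [List.length_zip, List.length_map, List.length_take, List.length_drop,
      List.length_reverse, List.length_range'] at hk1 hk2
    have hkj : k < j - 1 := by omega
    have h1 : 1 + k < p.length := by omega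
    have h2 : j - (1 + k) < r.length := by omega
    have hidx : 1 + ((List.drop 1 r).length - 1 - k) = j - (1 + k) := by
      simp only [List.length_drop]; omega
    simp only [pvCand, Nat.one_mul, hidx]
    rw [List.getD_eq_getElem?_getD, List.getD_eq_getElem?_getD,
        List.getElem?_eq_getElem h1, List.getElem?_eq_getElem h2]
    simp only [Option.getD_some]

-- the main invariant relating A's (r, s) state to B's revenue list
lemma pvInv (p : List Int) (c : Int) (N : Nat) (hp : N ≤ p.length) :
    ∀ j, j ≤ N →
      (pvStB p c j).length = j + 1 ∧
      (pvStA p c N j).1.length = N + 1 ∧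
      (pvStA p c N j).2.length = N + 1 ∧
      (∀ k, k ≤ j → (pvStA p c N j).1.getD k 0 = (pvStB p c j).getD k 0) ∧
      (∀ k, 1 ≤ k → k ≤ j → (pvStA p c N j).2.getD k 0 = pvPieceB p c (pvStB p c j) k) := by
  intro j
  induction j with
  | zero =>
    intro _
    refine ⟨rfl, by simp [pvStA], by simp [pvStA], ?_, by omega⟩
    intro k hk
    interval_cases k
    simp [pvStA, pvStB, List.getD_eq_getElem?_getD]
  | succ j ih =>
    intro hj1
    obtain ⟨hBl, hAl, hSl, hb, he⟩ := ih (by omega)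
    have hconcat : List.range' 1 (j+1) = List.range' 1 j ++ [j+1] := by
      rw [List.range'_concat, Nat.one_mul, Nat.add_comm]
    have hstep : pvStA p c N (j+1) = pvStepA p c (pvStA p c N j) (j+1) := by
      unfold pvStA
      rw [hconcat, List.foldl_append, List.foldl_cons, List.foldl_nil]
    have hstepB : pvStB p c (j+1) = pvStepB p c (pvStB p c j) (j+1) := by
      unfold pvStB
      rw [hconcat, List.foldl_append, List.foldl_cons, List.foldl_nil]
    have hcand : ∀ i, 1 ≤ i → i ≤ j →
        pvCand p c (pvStA p c N j).1 (j+1) i = pvCand p c (pvStB p c j) (j+1) i := by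
      intro i hi1 hij
      simp only [pvCand]
      rw [hb (j+1-i) (by omega)]
    have hinner :
        (List.range' 1 j).foldl
          (fun q i => if pvLtQ q.1 (pvCand p c (pvStA p c N j).1 (j+1) i)
                      then (some (pvCand p c (pvStA p c N j).1 (j+1) i), (i : Int)) else q)
          ((none : Option Int), (pvStA p c N j).2.getD (j+1) 0)
        = pvScan (pvCand p c (pvStB p c j) (j+1)) (List.range' 1 j)
            ((none : Option Int), (pvStA p c N j).2.getD (j+1) 0) := by
      apply PySem.List.foldl_congr_mem
      intro acc i hi
      rw [List.mem_range'_1] at hi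
      rw [hcand i hi.1 (by omega)]
    have hfin := pvStep_pair (pvCand p c (pvStB p c j) (j+1)) (List.range' 1 j)
        (p.getD (j+1) 0) ((pvStA p c N j).2.getD (j+1) 0) ((j+1 : Nat) : Int)
    simp only [] at hfin
    have hstA : pvStA p c N (j+1)
        = ((pvStA p c N j).1.set (j+1)
             ((PySem.List.max? ((List.range' 1 j).map (pvCand p c (pvStB p c j) (j+1))
                 ++ [p.getD (j+1) 0]) (fun y => y)).getD 0),
           (pvStA p c N j).2.set (j+1)
             (pvTag (pvCand p c (pvStB p c j) (j+1)) (List.range' 1 j)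
               ((PySem.List.max? ((List.range' 1 j).map (pvCand p c (pvStB p c j) (j+1))
                  ++ [p.getD (j+1) 0]) (fun y => y)).getD 0) ((j+1 : Nat) : Int))) := by
      rw [hstep]
      unfold pvStepA
      simp only [Nat.add_sub_cancel]
      rw [hinner, hfin]
    have hstB : pvStB p c (j+1)
        = pvStB p c j ++
            [(PySem.List.max? ((List.range' 1 j).map (pvCand p c (pvStB p c j) (j+1))
               ++ [p.getD (j+1) 0]) (fun y => y)).getD 0] := by
      rw [hstepB]
      unfold pvStepB
      rw [pvCands_eq p c (pvStB p c j) (j+1) hBl (by omega)]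
      simp only [Nat.add_sub_cancel]
    set X := (PySem.List.max? ((List.range' 1 j).map (pvCand p c (pvStB p c j) (j+1))
               ++ [p.getD (j+1) 0]) (fun y => y)).getD 0 with hX
    have hgetTop : (pvStB p c j ++ [X]).getD (j+1) 0 = X := by
      have := getD_append_self (pvStB p c j) X
      rwa [hBl] at this
    refine ⟨?_, ?_, ?_, ?_, ?_⟩
    · rw [hstB]; simp [hBl]
    · rw [hstA]; simp [hAl]
    · rw [hstA]; simp [hSl]
    · intro k hk
      rw [hstA, hstB]
      by_cases hkj : k = j+1
      · subst hkj
        rw [getD_set_self _ _ _ (by omega), hgetTop]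
      · rw [getD_set_ne _ _ _ _ (by omega), getD_append_left _ _ _ (by omega),
            hb k (by omega)]
    · intro k hk1 hk
      rw [hstA, hstB]
      by_cases hkj : k = j+1
      · subst hkj
        rw [getD_set_self _ _ _ (by omega)]
        unfold pvPieceB
        rw [hgetTop]
        rw [find?_congr_mem _ _ (fun i => pvCand p c (pvStB p c j) (j+1) i == X)
            (by
              intro i hi
              rw [List.mem_range'_1] at hi
              rw [pvCand_append p c (pvStB p c j) X (j+1) i (by omega)])]
        rfl
      · rw [getD_set_ne _ _ _ _ (by omega), he k hk1 (by omega),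
            pvPieceB_append p c (pvStB p c j) X k (by omega)]

lemma pvPieceB_bounds (p : List Int) (c : Int) (r : List Int) (m : Nat) (h : 1 ≤ m) :
    1 ≤ pvPieceB p c r m ∧ pvPieceB p c r m ≤ (m : Int) := by
  unfold pvPieceB
  cases hf : (List.range' 1 (m-1)).find? (fun i => pvCand p c r m i == r.getD m 0) with
  | none => simp; omega
  | some i =>
    have hm := List.mem_of_find?_eq_some hf
    rw [List.mem_range'_1] at hm
    simp only []
    constructor
    · exact_mod_cast hm.1
    · have : i < m := by omega
      exact_mod_cast le_of_lt this

lemma pvRebuild_eq (p : List Int) (c : Int) (sA rB : List Int) (N : Nat)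
    (h : ∀ k, 1 ≤ k → k ≤ N → sA.getD k 0 = pvPieceB p c rB k) :
    ∀ fuel (m : Int), m ≤ (N : Int) → pvRebuildA sA fuel m = pvRebuildB p c rB fuel m := by
  intro fuel
  induction fuel with
  | zero => intros; rfl
  | succ f ih =>
    intro m hm
    by_cases hm0 : 0 < m
    · have hk1 : 1 ≤ m.toNat := by omega
      have hkN : m.toNat ≤ N := by omega
      have hs : sA.getD m.toNat 0 = pvPieceB p c rB m.toNat := h _ hk1 hkN
      have hbnd := pvPieceB_bounds p c rB m.toNat hk1
      have hcast : ((m.toNat : Int)) = m := by omega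
      rw [hcast] at hbnd
      simp only [pvRebuildA, pvRebuildB, if_pos hm0, hs]
      rw [ih (m - pvPieceB p c rB m.toNat) (by omega)]
    · simp [pvRebuildA, pvRebuildB, hm0]

-- ===== VERDICT (by name: the statement is the Claim_ definition above) =====
theorem cut_rod_with_cost_spec : Claim_equal_cut_rod_with_cost := by
  intro p n c _ hpre
  unfold Spec_cut_rod_with_cost
  obtain ⟨hn, hor⟩ := hpre
  have hp : n.toNat ≤ p.length := by
    rcases hor with h | h
    · omega
    · omega
  obtain ⟨hBl, hAl, hSl, hb, he⟩ := pvInv p c n.toNat hp n.toNat (le_refl _)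
  have hA : cut_rod_with_cost p n c
      = ((pvStA p c n.toNat n.toNat).1.getD ((pvStA p c n.toNat n.toNat).1.length - 1) 0,
         pvRebuildA (pvStA p c n.toNat n.toNat).2 (n.toNat + 1) n) := rfl
  have hB : cut_rod_with_cost_alt p n c
      = ((pvStB p c n.toNat).getD n.toNat 0,
         pvRebuildB p c (pvStB p c n.toNat) (n.toNat + 1) n) := rfl
  rw [hA, hB, Prod.mk.injEq]
  constructor
  · rw [hAl]
    simpa using hb n.toNat (le_refl _)
  · exact pvRebuild_eq p c _ _ n.toNat he (n.toNat + 1) n (by omega)
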